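-- pv_equiv track=rewrite | github.com/tae-hyunkim/personal_study | 코테공부/23년/Days11-1.py | solution
-- ===== SOURCE A (Python) =====
-- def solution(survey, choices):
--     answer = ''
--     num_dict = {'R':0, 'C':0, 'J':0, 'A':0}
--     chr_dict = {'T':'R','F':'C','M':'J','N':'A'}
--     chr_dict2 = {'R':'T','C':'F','J':'M','A':'N'}
--
--     for i,j in zip(survey,choices):
--         if i[0] in num_dict:
--             num_dict[i[0]] = num_dict[i[0]] - (j - 4)
--         else:
--             num_dict[chr_dict[i[0]]] = num_dict[chr_dict[i[0]]] + (j - 4)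
--
--     for texts, nums in num_dict.items():
--         if nums < 0 :
--             answer += chr_dict2[texts]
--         else:
--             answer += texts
--     return answer
-- ===== SOURCE B (Python) =====
-- # Staged passes: one independent signed sum per dimension, no dict or mutable
-- # accumulator at all; each dimension's winner is decided by the sign of its sum.
-- def solution(survey, choices):
--     def diff(a, b):
--         return sum((4 - c) * ((s[0] == a) - (s[0] == b))
--                    for s, c in zip(survey, choices))
--     return ''.join(a if diff(a, b) >= 0 else b
--                    for a, b in ('RT', 'CF', 'JM', 'AN'))
-- ===== Notes on version B (the rewrite author's own statement) =====
-- stated objective: alternative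
-- what changed: B replaces A's single pass mutating a score dict (plus two translation dicts decoded while iterating dict items) with four independent staged passes, one per MBTI dimension, each computing a closed-form signed sum whose sign picks the letter; no dictionary or mutable state remains.
import Mathlib
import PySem

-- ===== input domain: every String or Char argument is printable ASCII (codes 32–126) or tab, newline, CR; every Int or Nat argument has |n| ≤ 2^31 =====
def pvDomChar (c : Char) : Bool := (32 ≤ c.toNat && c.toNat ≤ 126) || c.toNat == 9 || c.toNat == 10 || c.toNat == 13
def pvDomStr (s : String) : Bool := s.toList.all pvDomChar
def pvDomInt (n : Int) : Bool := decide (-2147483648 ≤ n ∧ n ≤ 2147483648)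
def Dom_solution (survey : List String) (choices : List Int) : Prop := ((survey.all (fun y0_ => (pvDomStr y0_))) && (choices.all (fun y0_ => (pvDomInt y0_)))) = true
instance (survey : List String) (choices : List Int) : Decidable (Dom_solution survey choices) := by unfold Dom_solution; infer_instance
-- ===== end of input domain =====

-- B replaces A's single dict-mutating pass with four independent staged passes,
-- one signed sum per dimension, whose sign picks the letter (objective: alternative; same cost).

-- ===== PORT A =====
-- chr_dict / chr_dict2 of A (dict literals of the function body)
def chrDictA : PySem.Dict Char Char :=
  PySem.Dict.ofList [('T','R'),('F','C'),('M','J'),('N','A')]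
def chrDict2A : PySem.Dict Char Char :=
  PySem.Dict.ofList [('R','T'),('C','F'),('J','M'),('A','N')]

-- loop body of A's first for-loop (getD defaults only fire where Python raises, outside Pre_)
def stepA (d : PySem.Dict Char Int) (p : String × Int) : PySem.Dict Char Int :=
  let c := (PySem.Str.pyGet? p.1 0).getD ' '          -- i[0]; none = IndexError, outside Pre_
  if d.contains c then
    d.insert c (d.getD c 0 - (p.2 - 4))
  else
    let k := chrDictA.getD c ' '                       -- chr_dict[i[0]]; KeyError outside Pre_
    d.insert k (d.getD k 0 + (p.2 - 4))

def solution (survey : List String) (choices : List Int) : String :=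
  let numDict : PySem.Dict Char Int := PySem.Dict.ofList [('R',0),('C',0),('J',0),('A',0)]
  let nd := (survey.zip choices).foldl stepA numDict
  String.ofList (nd.items.foldl
    (fun ans p => if p.2 < 0 then ans ++ [chrDict2A.getD p.1 ' '] else ans ++ [p.1])
    ([] : List Char))

-- ===== PORT B =====
-- one term of B's generator: (4 - c) * ((s[0] == a) - (s[0] == b))
def contribB (a b : Char) (p : String × Int) : Int :=
  (4 - p.2) * ((if ((PySem.Str.pyGet? p.1 0).getD ' ') == a then 1 else 0)
             - (if ((PySem.Str.pyGet? p.1 0).getD ' ') == b then 1 else 0))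

-- B's diff(a, b): sum(...) over zip(survey, choices)
def diffB (a b : Char) (l : List (String × Int)) : Int :=
  l.foldl (fun acc p => acc + contribB a b p) 0

def solution_alt (survey : List String) (choices : List Int) : String :=
  String.ofList (([('R','T'),('C','F'),('J','M'),('A','N')] : List (Char × Char)).map
    (fun ab => if diffB ab.1 ab.2 (survey.zip choices) ≥ 0 then ab.1 else ab.2))

-- ===== PRECONDITION & SPEC =====
-- Pre_ excludes exactly the inputs where A raises: some zipped question whose string is
-- empty (IndexError on i[0]) or whose first letter is not one of the 8 MBTI letters
-- (KeyError on chr_dict[i[0]]).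
def Pre_solution (survey : List String) (choices : List Int) : Prop :=
  ∀ p ∈ survey.zip choices,
    p.1.toList ≠ [] ∧ p.1.toList.headD ' ' ∈ (['R','T','C','F','J','M','A','N'] : List Char)
instance (survey : List String) (choices : List Int) : Decidable (Pre_solution survey choices) := by
  unfold Pre_solution; infer_instance
def pvWitness_solution : List String × List Int := (["RN", "TR", "Cv"], [1, 6, 4])

def Spec_solution (survey : List String) (choices : List Int) (out : String) : Prop :=
  out = solution_alt survey choices
instance (survey : List String) (choices : List Int) (out : String) : Decidable (Spec_solution survey choices out) := by unfold Spec_solution; infer_instance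

-- ===== CLAIM (what is proved, stated in full; the proofs are below) =====
def Claim_equal_solution : Prop := ∀ (survey : List String) (choices : List Int), Dom_solution survey choices → Pre_solution survey choices → Spec_solution survey choices (solution survey choices)

-- ===== LEMMAS AND PROOFS =====

-- the dict shape maintained by A's loop
def dictA (t : Int × Int × Int × Int) : PySem.Dict Char Int :=
  PySem.Dict.mk [('R', t.1), ('C', t.2.1), ('J', t.2.2.1), ('A', t.2.2.2)]

-- contribB with the first letter made explicit
def contribC (a b x : Char) (c : Int) : Int :=
  (4 - c) * ((if x == a then 1 else 0) - (if x == b then 1 else 0))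

-- recursive form of the four sums
def Srec (a b : Char) : List (String × Int) → Int
  | [] => 0
  | p :: l => contribB a b p + Srec a b l

theorem head_get? (s : String) (x : Char) (rest : List Char) (hs : s.toList = x :: rest) :
    PySem.Str.pyGet? s 0 = some x := by
  rw [show ((0:Int)) = ((0:Nat):Int) from rfl, PySem.Str.pyGet?_natCast, hs]; rfl

theorem foldl_Srec (a b : Char) : ∀ (l : List (String × Int)) (acc : Int),
    l.foldl (fun acc p => acc + contribB a b p) acc = acc + Srec a b l := by
  intro l
  induction l with
  | nil => intro acc; simp [Srec]
  | cons p l ih => intro acc; simp only [List.foldl_cons, Srec, ih]; ring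

theorem contribB_eq (a b : Char) (s : String) (c : Int) (x : Char) (rest : List Char)
    (hs : s.toList = x :: rest) : contribB a b (s, c) = contribC a b x c := by
  unfold contribB contribC
  rw [head_get? s x rest hs]
  rfl

def updA (t : Int × Int × Int × Int) (x : Char) (j : Int) : Int × Int × Int × Int :=
  match x with
  | 'R' => (t.1 - (j-4), t.2.1, t.2.2.1, t.2.2.2) | 'T' => (t.1 + (j-4), t.2.1, t.2.2.1, t.2.2.2)
  | 'C' => (t.1, t.2.1 - (j-4), t.2.2.1, t.2.2.2) | 'F' => (t.1, t.2.1 + (j-4), t.2.2.1, t.2.2.2)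
  | 'J' => (t.1, t.2.1, t.2.2.1 - (j-4), t.2.2.2) | 'M' => (t.1, t.2.1, t.2.2.1 + (j-4), t.2.2.2)
  | 'A' => (t.1, t.2.1, t.2.2.1, t.2.2.2 - (j-4)) | 'N' => (t.1, t.2.1, t.2.2.1, t.2.2.2 + (j-4))
  | _ => t

theorem stepA_updA (t : Int × Int × Int × Int) (s : String) (j : Int) (x : Char) (rest : List Char)
    (hs : s.toList = x :: rest) (hx : x ∈ (['R','T','C','F','J','M','A','N'] : List Char)) :
    stepA (dictA t) (s, j) = dictA (updA t x j) := by
  unfold stepA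
  rw [head_get? s x rest hs]
  fin_cases hx <;> rfl

theorem updA_contrib (t : Int × Int × Int × Int) (x : Char) (j : Int)
    (hx : x ∈ (['R','T','C','F','J','M','A','N'] : List Char)) :
    updA t x j = (t.1 + contribC 'R' 'T' x j, t.2.1 + contribC 'C' 'F' x j,
                  t.2.2.1 + contribC 'J' 'M' x j, t.2.2.2 + contribC 'A' 'N' x j) := by
  obtain ⟨a, c, e, g⟩ := t
  fin_cases hx <;> simp [updA, contribC, Prod.ext_iff] <;> ring

theorem stepA_eq (t : Int × Int × Int × Int) (s : String) (j : Int) (x : Char) (rest : List Char)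
    (hs : s.toList = x :: rest) (hx : x ∈ (['R','T','C','F','J','M','A','N'] : List Char)) :
    stepA (dictA t) (s, j) =
      dictA (t.1 + contribC 'R' 'T' x j, t.2.1 + contribC 'C' 'F' x j,
             t.2.2.1 + contribC 'J' 'M' x j, t.2.2.2 + contribC 'A' 'N' x j) := by
  rw [stepA_updA t s j x rest hs hx, updA_contrib t x j hx]

theorem fold_inv : ∀ (l : List (String × Int)),
    (∀ p ∈ l, p.1.toList ≠ [] ∧ p.1.toList.headD ' ' ∈ (['R','T','C','F','J','M','A','N'] : List Char)) →
    ∀ t : Int × Int × Int × Int,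
    l.foldl stepA (dictA t) =
      dictA (t.1 + Srec 'R' 'T' l, t.2.1 + Srec 'C' 'F' l,
             t.2.2.1 + Srec 'J' 'M' l, t.2.2.2 + Srec 'A' 'N' l) := by
  intro l
  induction l with
  | nil => intro _ t; simp [Srec]
  | cons p l ih =>
    intro hl t
    obtain ⟨s, j⟩ := p
    obtain ⟨hne, hmem⟩ := hl (s, j) (by simp)
    obtain ⟨x, rest, hs⟩ : ∃ x rest, s.toList = x :: rest := by
      cases h : s.toList with
      | nil => exact absurd h hne
      | cons a b => exact ⟨a, b, rfl⟩
    have hx : x ∈ (['R','T','C','F','J','M','A','N'] : List Char) := by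
      rw [hs] at hmem; simpa using hmem
    rw [List.foldl_cons, stepA_eq t s j x rest hs hx,
        ih (fun q hq => hl q (List.mem_cons_of_mem _ hq))]
    simp only [Srec, contribB_eq _ _ s j x rest hs]
    simp only [dictA]
    refine congrArg _ ?_
    simp only [List.cons.injEq, Prod.mk.injEq]
    and_intros <;> first | rfl | trivial | ring

-- ===== VERDICT (by name: the statement is the Claim_ definition above) =====
theorem solution_spec : Claim_equal_solution := by
  intro survey choices _hdom hpre
  unfold Spec_solution solution solution_alt
  dsimp only
  rw [show (PySem.Dict.ofList [('R',(0:Int)),('C',0),('J',0),('A',0)])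
        = dictA (0, 0, 0, 0) from rfl,
      fold_inv (survey.zip choices) hpre (0, 0, 0, 0)]
  set l := survey.zip choices with hl
  have eA : (dictA (0 + Srec 'R' 'T' l, 0 + Srec 'C' 'F' l,
                    0 + Srec 'J' 'M' l, 0 + Srec 'A' 'N' l)).items
      = [('R', 0 + Srec 'R' 'T' l), ('C', 0 + Srec 'C' 'F' l),
         ('J', 0 + Srec 'J' 'M' l), ('A', 0 + Srec 'A' 'N' l)] := rfl
  rw [eA]
  simp only [List.foldl, List.map, diffB, foldl_Srec, zero_add, ge_iff_le,
             List.nil_append]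
  have c1 : chrDict2A.getD 'R' ' ' = 'T' := rfl
  have c2 : chrDict2A.getD 'C' ' ' = 'F' := rfl
  have c3 : chrDict2A.getD 'J' ' ' = 'M' := rfl
  have c4 : chrDict2A.getD 'A' ' ' = 'N' := rfl
  rw [c1, c2, c3, c4]
  split_ifs <;> first | rfl | (exfalso; omega)
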